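-- pv_equiv track=rewrite | github.com/LumberKnot/advent_of_code_25 | src/dec11.py | find_num_paths
-- ===== SOURCE A (Python) =====
-- def find_num_paths(graph, traversed: set, current, target="out"):
--     """Question is a bit unclear but my theory is
--
--     Nodes - can be traversed several times
--     Edges - can only be traversed once!
--
--     Solve with depth first
--
--     Termination conditions
--         Reached target - return 1
--         No nodes to traverse - return 0
--
--     """
--
--     if current == target:
--         return 1
--
--     paths = 0
--
--     for next in graph.get(current, []):
--         if (current, next) not in traversed:  # not yet traversed edge
--             traversed.add((current, next))
--             paths += find_num_paths(graph, traversed, next, target)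
--             traversed.remove((current, next))
--
--     return paths
-- ===== SOURCE B (Python) =====
-- def find_num_paths(graph, traversed: set, current, target="out"):
--     # Graph-shrinking reformulation: instead of threading a mutable set of used
--     # edges, prune traversed edges out of the graph once, then recurse on ever
--     # smaller graphs (removing each taken edge from the adjacency structure).
--     pruned = {u: [v for v in nbrs if (u, v) not in traversed] for u, nbrs in graph.items()}
--     return _count_paths(pruned, current, target)
--
--
-- def _count_paths(g, cur, target):
--     if cur == target:
--         return 1
--     nbrs = g.get(cur, [])
--     total = 0
--     for nxt in nbrs:
--         total += _count_paths({**g, cur: [v for v in nbrs if v != nxt]}, nxt, target)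
--     return total
-- ===== Notes on version B (the rewrite author's own statement) =====
-- stated objective: alternative
-- what changed: B replaces A's recursion over a mutable set of traversed edges with a pure graph-shrinking recursion: the graph is pruned of already-traversed edges once up front, and each recursive step removes the taken edge from the adjacency structure instead of threading a visited set.
import Mathlib
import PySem

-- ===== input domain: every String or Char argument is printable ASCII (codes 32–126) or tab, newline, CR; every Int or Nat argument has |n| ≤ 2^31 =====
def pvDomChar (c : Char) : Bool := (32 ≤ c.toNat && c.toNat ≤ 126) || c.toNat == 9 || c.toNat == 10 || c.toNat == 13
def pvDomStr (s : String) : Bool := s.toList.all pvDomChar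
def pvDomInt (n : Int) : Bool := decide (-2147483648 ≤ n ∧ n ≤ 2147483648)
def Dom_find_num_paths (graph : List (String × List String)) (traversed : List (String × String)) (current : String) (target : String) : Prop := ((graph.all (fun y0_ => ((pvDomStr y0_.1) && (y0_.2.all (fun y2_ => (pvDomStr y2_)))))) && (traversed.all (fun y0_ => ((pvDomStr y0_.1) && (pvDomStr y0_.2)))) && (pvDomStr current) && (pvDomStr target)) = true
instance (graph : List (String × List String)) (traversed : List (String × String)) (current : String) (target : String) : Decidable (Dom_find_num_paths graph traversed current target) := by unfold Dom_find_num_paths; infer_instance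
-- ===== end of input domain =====

-- B replaces A's mutable traversed-edge set with a once-pruned, ever-shrinking graph (objective: alternative
-- decomposition, same cost). A mutates `traversed` in place but net-zero (every added edge is removed again;
-- only the set's internal order can change), B does not mutate: the equivalence proved here is about the
-- RETURN value only. The `Nat` fuel in both ports is a totality guard only: it is
-- computed large enough that it never runs out on the entry calls.

-- ===== PORT A =====
-- number of edge occurrences of `graph` not yet in `traversed`: an upper bound on A's recursion depth
def pvFree (graph : List (String × List String)) (traversed : List (String × String)) : Nat :=
  (graph.map (fun p => p.2.countP (fun v => decide ((p.1, v) ∉ traversed)))).sum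

-- the for-loop with accumulator `paths` ("for next in graph.get(current, []): …"); `go` is the recursive
-- call at the next fuel level; after each recursive call the Python set is restored, so the iteration
-- continues with the unchanged `traversed`
def pvLoopA (go : PySem.Set (String × String) → String → Int)
    (traversed : PySem.Set (String × String)) (current : String) : List String → Int → Int
  | [], paths => paths
  | nxt :: rest, paths =>
    if (current, nxt) ∈ traversed then pvLoopA go traversed current rest paths
    else pvLoopA go traversed current rest
      (paths + go (PySem.Set.add traversed (current, nxt)) nxt)

-- the recursive function itself ("if current == target: return 1 … return paths")
def pvGoA : Nat → PySem.Dict String (List String) → String → PySem.Set (String × String) → String → Int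
  | 0, _, _, _, _ => 0   -- fuel guard, never reached from find_num_paths
  | fuel + 1, graph, target, traversed, current =>
    if current = target then 1
    else pvLoopA (fun tr n => pvGoA fuel graph target tr n) traversed current (graph.getD current []) 0

def find_num_paths (graph : List (String × List String)) (traversed : List (String × String)) (current : String) (target : String) : Int :=
  pvGoA (pvFree graph traversed + 1) (PySem.Dict.mk graph) target traversed current

-- ===== PORT B =====
-- the pruned dict comprehension: {u: [v for v in nbrs if (u, v) not in traversed] for u, nbrs in graph.items()}
def pvPrune (graph : List (String × List String)) (traversed : List (String × String)) : PySem.Dict String (List String) :=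
  graph.foldl (fun d p => d.insert p.1 (p.2.filter (fun v => decide ((p.1, v) ∉ traversed)))) PySem.Dict.empty

-- total number of edge occurrences left in the shrinking graph: an upper bound on B's recursion depth
def pvEdges (g : PySem.Dict String (List String)) : Nat :=
  (g.items.map (fun p => p.2.length)).sum

-- the for-loop of _count_paths: `nbrs0` is the captured `nbrs = g.get(cur, [])`, `total` the
-- accumulator, `count` the recursive call at the next fuel level
def pvLoopB (count : PySem.Dict String (List String) → String → Int)
    (g : PySem.Dict String (List String)) (cur : String) (nbrs0 : List String) :
    List String → Int → Int
  | [], total => total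
  | nxt :: rest, total =>
    pvLoopB count g cur nbrs0 rest
      (total + count (g.insert cur (nbrs0.filter (fun v => decide (v ≠ nxt)))) nxt)

-- _count_paths
def pvCountB : Nat → PySem.Dict String (List String) → String → String → Int
  | 0, _, _, _ => 0   -- fuel guard, never reached from find_num_paths_alt
  | fuel + 1, g, cur, target =>
    if cur = target then 1
    else pvLoopB (fun g' n => pvCountB fuel g' n target) g cur (g.getD cur []) (g.getD cur []) 0

def find_num_paths_alt (graph : List (String × List String)) (traversed : List (String × String)) (current : String) (target : String) : Int :=
  pvCountB (pvEdges (pvPrune graph traversed) + 1) (pvPrune graph traversed) current target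

-- ===== PRECONDITION & SPEC =====
-- Pre_ excludes only association lists with a duplicated key: those do not represent any Python dict
-- (every real input to A is a dict, whose keys are unique), so nothing A accepts is lost.
def Pre_find_num_paths (graph : List (String × List String)) (traversed : List (String × String)) (current : String) (target : String) : Prop :=
  (graph.map Prod.fst).Nodup
instance (graph : List (String × List String)) (traversed : List (String × String)) (current : String) (target : String) : Decidable (Pre_find_num_paths graph traversed current target) := by unfold Pre_find_num_paths; infer_instance

def pvWitness_find_num_paths : (List (String × List String)) × (List (String × String)) × String × String :=
  ([("in", ["a", "b"]), ("a", ["out", "b"]), ("b", ["out"])], [("a", "b")], "in", "out")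

def Spec_find_num_paths (graph : List (String × List String)) (traversed : List (String × String)) (current : String) (target : String) (out : Int) : Prop := out = find_num_paths_alt graph traversed current target
instance (graph : List (String × List String)) (traversed : List (String × String)) (current : String) (target : String) (out : Int) : Decidable (Spec_find_num_paths graph traversed current target out) := by unfold Spec_find_num_paths; infer_instance

-- ===== CLAIM (what is proved, stated in full; the proofs are below) =====
def Claim_equal_find_num_paths : Prop := ∀ (graph : List (String × List String)) (traversed : List (String × String)) (current : String) (target : String), Dom_find_num_paths graph traversed current target → Pre_find_num_paths graph traversed current target → Spec_find_num_paths graph traversed current target (find_num_paths graph traversed current target)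

-- ===== LEMMAS AND PROOFS =====

theorem pv_L1 (graph : List (String × List String)) (tr : List (String × String))
    (hnd : (graph.map Prod.fst).Nodup) :
    (pvPrune graph tr).items
      = graph.map (fun p => (p.1, p.2.filter (fun v => decide ((p.1, v) ∉ tr)))) := by
  unfold pvPrune
  rw [PySem.Dict.items_foldl_insert_fresh graph Prod.fst
      (fun p => p.2.filter (fun v => decide ((p.1, v) ∉ tr))) PySem.Dict.empty
      (fun a _ => PySem.Dict.contains_empty _) hnd]
  simp [PySem.Dict.empty]

theorem pv_keys_prune (graph : List (String × List String)) (tr : List (String × String))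
    (hnd : (graph.map Prod.fst).Nodup) :
    (pvPrune graph tr).keys = graph.map Prod.fst := by
  simp [PySem.Dict.keys, pv_L1 graph tr hnd, Function.comp]

theorem pv_L2 (graph : List (String × List String)) (tr : List (String × String))
    (hnd : (graph.map Prod.fst).Nodup) (k : String) :
    (pvPrune graph tr).get? k
      = ((PySem.Dict.mk graph).get? k).map
          (fun vs => vs.filter (fun v => decide ((k, v) ∉ tr))) := by
  cases hg : (PySem.Dict.mk graph).get? k with
  | none =>
    rw [PySem.Dict.get?_eq_none_iff_not_mem_keys] at hg
    simp only [Option.map_none]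
    rw [PySem.Dict.get?_eq_none_iff_not_mem_keys, pv_keys_prune graph tr hnd]
    simpa [PySem.Dict.keys] using hg
  | some vs =>
    have hmem : (k, vs) ∈ graph := PySem.Dict.mem_items_of_get?_eq_some _ hg
    have hmem' : (k, vs.filter (fun v => decide ((k, v) ∉ tr))) ∈ (pvPrune graph tr).items := by
      rw [pv_L1 graph tr hnd]
      exact List.mem_map.mpr ⟨(k, vs), hmem, rfl⟩
    have := PySem.Dict.get?_of_mem_items _ hmem' (by rw [pv_keys_prune graph tr hnd]; simpa using hnd)
    simp [this]

theorem pv_L3 (graph : List (String × List String)) (tr : List (String × String))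
    (hnd : (graph.map Prod.fst).Nodup) (k : String) :
    (pvPrune graph tr).getD k []
      = ((PySem.Dict.mk graph).getD k []).filter (fun v => decide ((k, v) ∉ tr)) := by
  rw [PySem.Dict.getD_eq_get?_getD, PySem.Dict.getD_eq_get?_getD, pv_L2 graph tr hnd]
  cases (PySem.Dict.mk graph).get? k <;> simp
theorem pv_sum_lt {α : Type} (l : List α) (f g : α → Nat)
    (hle : ∀ x ∈ l, f x ≤ g x) (a : α) (ha : a ∈ l) (hlt : f a < g a) :
    (l.map f).sum < (l.map g).sum := by
  induction l with
  | nil => cases ha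
  | cons b t ih =>
    simp only [List.map_cons, List.sum_cons]
    have hsle : (t.map f).sum ≤ (t.map g).sum :=
      List.sum_le_sum (fun x hx => hle x (List.mem_cons_of_mem _ hx))
    rcases List.mem_cons.mp ha with rfl | hat
    · omega
    · have := ih (fun x hx => hle x (List.mem_cons_of_mem _ hx)) hat
      have := hle b List.mem_cons_self
      omega

theorem pv_L6 (graph : List (String × List String)) (tr : List (String × String))
    (hnd : (graph.map Prod.fst).Nodup) :
    pvFree graph tr = pvEdges (pvPrune graph tr) := by
  unfold pvFree pvEdges
  rw [pv_L1 graph tr hnd, List.map_map]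
  congr 1
  apply List.map_congr_left
  intro p _
  simp [List.countP_eq_length_filter]

theorem pv_L5 (d : PySem.Dict String (List String)) (hnd : d.keys.Nodup)
    (cur nxt : String) (nbrs0 : List String)
    (hget : d.get? cur = some nbrs0) (hmem : nxt ∈ nbrs0) :
    pvEdges (d.insert cur (nbrs0.filter (fun v => decide (v ≠ nxt)))) < pvEdges d := by
  have hmemi : (cur, nbrs0) ∈ d.items := PySem.Dict.mem_items_of_get?_eq_some _ hget
  have hcont : d.contains cur = true :=
    (PySem.Dict.contains_iff_mem_keys _ _).mpr (by
      simp only [PySem.Dict.keys]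
      exact List.mem_map.mpr ⟨(cur, nbrs0), hmemi, rfl⟩)
  unfold pvEdges
  rw [PySem.Dict.items_insert_of_contains _ _ hcont, List.map_map]
  refine pv_sum_lt _ _ _ ?_ (cur, nbrs0) hmemi ?_
  · intro p hp
    by_cases h : p.1 = cur
    · have hpe : p = (cur, nbrs0) := List.inj_on_of_nodup_map hnd hp hmemi h
      subst hpe
      simp [Function.comp, List.length_filter_le]
    · simp [Function.comp, h]
  · have hl : (nbrs0.filter (fun v => decide (v ≠ nxt))).length < nbrs0.length := by
      rw [List.length_filter_lt_length_iff_exists]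
      exact ⟨nxt, hmem, by simp⟩
    simpa [Function.comp] using hl

theorem pv_L4 (graph : List (String × List String)) (tr : List (String × String))
    (hnd : (graph.map Prod.fst).Nodup) (cur nxt : String) (vs : List String)
    (hget : (PySem.Dict.mk graph).get? cur = some vs) :
    pvPrune graph (tr ++ [(cur, nxt)])
      = (pvPrune graph tr).insert cur
          (((pvPrune graph tr).getD cur []).filter (fun v => decide (v ≠ nxt))) := by
  have hmemg : (cur, vs) ∈ graph := PySem.Dict.mem_items_of_get?_eq_some _ hget
  have hcont : (pvPrune graph tr).contains cur = true :=
    (PySem.Dict.contains_iff_mem_keys _ _).mpr (by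
      rw [pv_keys_prune graph tr hnd]
      exact List.mem_map.mpr ⟨(cur, vs), hmemg, rfl⟩)
  have hgetD : (pvPrune graph tr).getD cur [] = vs.filter (fun v => decide ((cur, v) ∉ tr)) := by
    rw [pv_L3 graph tr hnd, PySem.Dict.getD_eq_get?_getD, hget]; rfl
  apply PySem.Dict.ext
  rw [PySem.Dict.items_insert_of_contains _ _ hcont, pv_L1 graph _ hnd, pv_L1 graph tr hnd,
    List.map_map, hgetD]
  apply List.map_congr_left
  intro p hp
  by_cases h : p.1 = cur
  · have hpe : p = (cur, vs) := List.inj_on_of_nodup_map hnd hp hmemg h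
    subst hpe
    simp only [Function.comp, BEq.rfl, if_true, List.filter_filter]
    refine Prod.ext rfl ?_
    apply List.filter_congr
    intro v _
    by_cases h1 : (cur, v) ∈ tr <;> by_cases h2 : v = nxt <;>
      simp [List.mem_append, h1, h2]
  · have hb : (p.1 == cur) = false := by simpa using h
    simp only [Function.comp, hb, Bool.false_eq_true, if_false]
    refine Prod.ext rfl ?_
    apply List.filter_congr
    intro v _
    have : ((p.1, v) ∈ tr ++ [(cur, nxt)]) ↔ (p.1, v) ∈ tr := by
      simp [List.mem_append, Prod.ext_iff, h]
    simp [this]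

theorem pvLoopEq (fuel : Nat) (graph : List (String × List String))
    (tr : List (String × String)) (cur target : String)
    (hnd : (graph.map Prod.fst).Nodup)
    (hub : pvEdges (pvPrune graph tr) < fuel + 1)
    (IH : ∀ (graph : List (String × List String)) (tr : List (String × String)) (cur target : String),
      (graph.map Prod.fst).Nodup → pvEdges (pvPrune graph tr) < fuel →
      pvGoA fuel (PySem.Dict.mk graph) target tr cur = pvCountB fuel (pvPrune graph tr) cur target) :
    ∀ (sub : List String) (acc : Int), sub ⊆ (PySem.Dict.mk graph).getD cur [] →
      pvLoopA (fun tr' n => pvGoA fuel (PySem.Dict.mk graph) target tr' n) tr cur sub acc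
        = pvLoopB (fun g' n => pvCountB fuel g' n target) (pvPrune graph tr) cur ((pvPrune graph tr).getD cur [])
            (sub.filter (fun v => decide ((cur, v) ∉ tr))) acc := by
  intro sub
  induction sub with
  | nil => intro acc _; simp [pvLoopA, pvLoopB]
  | cons nxt rest iha =>
    intro acc hsub
    have hnxt : nxt ∈ (PySem.Dict.mk graph).getD cur [] := hsub List.mem_cons_self
    have hrest : rest ⊆ (PySem.Dict.mk graph).getD cur [] :=
      fun x hx => hsub (List.mem_cons_of_mem _ hx)
    by_cases hm : (cur, nxt) ∈ tr
    · rw [List.filter_cons_of_neg (by simpa using hm)]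
      simp only [pvLoopA, if_pos hm]
      exact iha acc hrest
    · obtain ⟨nbrsA, hget⟩ : ∃ vs, (PySem.Dict.mk graph).get? cur = some vs := by
        cases hg : (PySem.Dict.mk graph).get? cur with
        | none =>
          rw [PySem.Dict.getD_eq_get?_getD, hg] at hnxt
          cases hnxt
        | some vs => exact ⟨vs, rfl⟩
      have hnbrsA : (PySem.Dict.mk graph).getD cur [] = nbrsA := by
        rw [PySem.Dict.getD_eq_get?_getD, hget]; rfl
      have hadd : PySem.Set.add tr (cur, nxt) = tr ++ [(cur, nxt)] := by
        unfold PySem.Set.add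
        rw [if_neg (by simpa using hm)]
      have hget' : (pvPrune graph tr).get? cur
          = some (nbrsA.filter (fun v => decide ((cur, v) ∉ tr))) := by
        rw [pv_L2 graph tr hnd, hget]; rfl
      have hgetD' : (pvPrune graph tr).getD cur []
          = nbrsA.filter (fun v => decide ((cur, v) ∉ tr)) := by
        rw [PySem.Dict.getD_eq_get?_getD, hget']; rfl
      have hmem0 : nxt ∈ nbrsA.filter (fun v => decide ((cur, v) ∉ tr)) :=
        List.mem_filter.mpr ⟨hnbrsA ▸ hnxt, by simpa using hm⟩
      have hins : pvPrune graph (tr ++ [(cur, nxt)])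
          = (pvPrune graph tr).insert cur
              (((pvPrune graph tr).getD cur []).filter (fun v => decide (v ≠ nxt))) :=
        pv_L4 graph tr hnd cur nxt nbrsA hget
      have hlt : pvEdges (pvPrune graph (tr ++ [(cur, nxt)])) < fuel := by
        rw [hins, hgetD']
        have h5 := pv_L5 (pvPrune graph tr)
          (by rw [pv_keys_prune graph tr hnd]; exact hnd) cur nxt _ hget' hmem0
        omega
      have hrec : pvGoA fuel (PySem.Dict.mk graph) target (PySem.Set.add tr (cur, nxt)) nxt
          = pvCountB fuel ((pvPrune graph tr).insert cur
              (((pvPrune graph tr).getD cur []).filter (fun v => decide (v ≠ nxt)))) nxt target := by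
        rw [hadd, ← hins]
        exact IH graph (tr ++ [(cur, nxt)]) nxt target hnd hlt
      rw [List.filter_cons_of_pos (by simpa using hm)]
      simp only [pvLoopA, if_neg hm, pvLoopB]
      rw [hrec]
      exact iha _ hrest

theorem pvMain : ∀ (fuel : Nat) (graph : List (String × List String))
    (tr : List (String × String)) (cur target : String),
    (graph.map Prod.fst).Nodup → pvEdges (pvPrune graph tr) < fuel →
    pvGoA fuel (PySem.Dict.mk graph) target tr cur = pvCountB fuel (pvPrune graph tr) cur target := by
  intro fuel
  induction fuel with
  | zero => intro graph tr cur target _ h; exact absurd h (Nat.not_lt_zero _)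
  | succ fuel IH =>
    intro graph tr cur target hnd hub
    by_cases ht : cur = target
    · simp [pvGoA, pvCountB, ht]
    · simp only [pvGoA, pvCountB, ht, if_false]
      have := pvLoopEq fuel graph tr cur target hnd hub IH
        ((PySem.Dict.mk graph).getD cur []) 0 (List.Subset.refl _)
      rw [this, pv_L3 graph tr hnd cur]

-- ===== VERDICT (by name: the statement is the Claim_ definition above) =====
theorem find_num_paths_spec : Claim_equal_find_num_paths := by
  intro graph traversed current target _hdom hpre
  unfold Spec_find_num_paths find_num_paths find_num_paths_alt
  rw [pv_L6 graph traversed hpre]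
  exact pvMain _ graph traversed current target hpre (Nat.lt_succ_self _)
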